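-- pv_equiv track=rewrite | github.com/maydayyezhen/MySssb | experiments/asl_wlasl/plus232_overlap_pipeline/build_v2_25_topk_backend_eval_candidates.py | sequence_diff
-- ===== SOURCE A (Python) =====
-- from typing import Dict, List, Sequence, Tuple
--
-- def sequence_diff(expected: Sequence[str], detected: Sequence[str]) -> Tuple[List[str], List[str]]:
--     expected_index = 0
--     matched_expected = [False for _ in expected]
--     matched_detected = [False for _ in detected]
--
--     for detected_index, label in enumerate(detected):
--         if expected_index < len(expected) and label == expected[expected_index]:
--             matched_expected[expected_index] = True
--             matched_detected[detected_index] = True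
--             expected_index += 1
--
--     missing_words = [
--         label for index, label in enumerate(expected) if not matched_expected[index]
--     ]
--     extra_words = [
--         label for index, label in enumerate(detected) if not matched_detected[index]
--     ]
--     return missing_words, extra_words
-- ===== SOURCE B (Python) =====
-- from typing import Dict, List, Sequence, Tuple
--
-- def sequence_diff(expected: Sequence[str], detected: Sequence[str]) -> Tuple[List[str], List[str]]:
--     # Search-based: for each expected label in order, locate its next occurrence in
--     # detected with list.index(label, start); everything skipped over between two
--     # consecutive matches is extra, and the unmatched expected suffix is missing.
--     detected_list = list(detected)
--     extra_words: List[str] = []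
--     start = 0
--     matched_count = 0
--     for label in expected:
--         try:
--             pos = detected_list.index(label, start)
--         except ValueError:
--             break
--         extra_words.extend(detected_list[start:pos])
--         start = pos + 1
--         matched_count += 1
--     extra_words.extend(detected_list[start:])
--     missing_words = list(expected[matched_count:])
--     return missing_words, extra_words
-- ===== Notes on version B (the rewrite author's own statement) =====
-- stated objective: alternative
-- what changed: Instead of A's single scan over detected with boolean matched-arrays and two filter passes, B loops over expected and jumps through detected with index(label, start) searches, emitting the skipped slice between consecutive matches as extra and the unmatched expected suffix as missing.
import Mathlib
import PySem

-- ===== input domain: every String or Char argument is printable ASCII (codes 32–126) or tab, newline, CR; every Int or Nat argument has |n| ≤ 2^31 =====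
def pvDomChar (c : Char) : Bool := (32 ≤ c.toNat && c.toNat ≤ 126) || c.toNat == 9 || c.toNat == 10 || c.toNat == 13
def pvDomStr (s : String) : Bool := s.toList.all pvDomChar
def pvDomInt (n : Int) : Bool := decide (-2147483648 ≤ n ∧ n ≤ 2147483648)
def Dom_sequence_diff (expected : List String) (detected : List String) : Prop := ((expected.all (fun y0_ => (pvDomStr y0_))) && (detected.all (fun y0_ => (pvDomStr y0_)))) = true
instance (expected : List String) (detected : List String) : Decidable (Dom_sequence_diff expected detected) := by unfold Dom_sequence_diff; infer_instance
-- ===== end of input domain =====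

-- B replaces A's scan over detected with boolean matched-arrays and two filter passes by
-- a loop over expected that index-searches detected, emitting inter-match slices as extra
-- (objective: alternative). Proved: same return value on all inputs.

-- ===== PORT A =====
-- the for-loop over enumerate(detected): state (expected_index, matched_expected, matched_detected),
-- detected_index carried explicitly
def pvALoop (expected : List String) : List String → Nat → Nat → List Bool → List Bool →
    Nat × List Bool × List Bool
  | [], _, ei, me, md => (ei, me, md)
  | label :: rest, di, ei, me, md =>
    if ei < expected.length ∧ label = expected.getD ei "" then
      pvALoop expected rest (di + 1) (ei + 1) (me.set ei true) (md.set di true)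
    else
      pvALoop expected rest (di + 1) ei me md
-- '[label for index, label in enumerate(xs) if not matched[index]]': matched has exactly
-- xs.length entries, so indexing matched[index] along enumerate(xs) is this parallel walk (exact)
def pvComp : List Bool → List String → List String
  | m :: ms, l :: ls => if m then pvComp ms ls else l :: pvComp ms ls
  | _, _ => []

def sequence_diff (expected : List String) (detected : List String) : List String × List String :=
  let r := pvALoop expected detected 0 0
      (List.replicate expected.length false) (List.replicate detected.length false)
  (pvComp r.2.1 expected, pvComp r.2.2 detected)

-- ===== PORT B =====
-- 'xs.index(lab, start)': first index of lab in xs at position ≥ start, ported as the first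
-- index within xs.drop start (none = ValueError, which Source B turns into break) — exact
def pvIdx : List String → String → Option Nat
  | [], _ => none
  | y :: ys, lab => if y = lab then some 0 else (pvIdx ys lab).map (· + 1)

-- Source B's for-loop over expected: state (start, matched_count, extra_words);
-- detected_list[start:pos] with pos = start + d is PySem.List.slice with those bounds
def pvBLoopB (detected : List String) : List String → Nat → Nat → List String →
    Nat × Nat × List String
  | [], start, k, extra => (start, k, extra)
  | label :: rest, start, k, extra =>
    match pvIdx (detected.drop start) label with
    | none => (start, k, extra)
    | some d =>
      pvBLoopB detected rest (start + d + 1) (k + 1)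
        (extra ++ PySem.List.slice detected (some (start : Int)) (some ((start + d : Nat) : Int)))

def sequence_diff_alt (expected : List String) (detected : List String) : List String × List String :=
  let r := pvBLoopB detected expected 0 0 []
  (PySem.List.slice expected (some ((r.2.1 : Nat) : Int)) none,
   r.2.2 ++ PySem.List.slice detected (some ((r.1 : Nat) : Int)) none)

-- ===== PRECONDITION & SPEC =====
def Spec_sequence_diff (expected : List String) (detected : List String) (out : List String × List String) : Prop := out = sequence_diff_alt expected detected
instance (expected : List String) (detected : List String) (out : List String × List String) : Decidable (Spec_sequence_diff expected detected out) := by unfold Spec_sequence_diff; infer_instance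

-- ===== CLAIM (what is proved, stated in full; the proofs are below) =====
def Claim_equal_sequence_diff : Prop := ∀ (expected : List String) (detected : List String), Dom_sequence_diff expected detected → Spec_sequence_diff expected detected (sequence_diff expected detected)

-- ===== LEMMAS AND PROOFS =====

-- reference greedy matcher, recursive on detected: number of matched expected labels and
-- the per-detected-position match mask
def pvG : List String → List String → Nat × List Bool
  | _, [] => (0, [])
  | [], _ :: rest => let r := pvG [] rest; (r.1, false :: r.2)
  | e :: es, l :: rest =>
    if l = e then let r := pvG es rest; (r.1 + 1, true :: r.2)
    else let r := pvG (e :: es) rest; (r.1, false :: r.2)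

-- A's loop as a function of the detected suffix (bridge proved in pv_aLoop_eq)
def pvBits (expected : List String) : List String → Nat → Nat × List Bool
  | [], ei => (ei, [])
  | label :: rest, ei =>
    if ei < expected.length ∧ label = expected.getD ei "" then
      let r := pvBits expected rest (ei + 1); (r.1, true :: r.2)
    else
      let r := pvBits expected rest ei; (r.1, false :: r.2)

theorem pv_set_append {α : Type} (pre : List α) (x y : α) (tl : List α) :
    (pre ++ x :: tl).set pre.length y = pre ++ y :: tl := by
  induction pre with
  | nil => rfl
  | cons a pre ih => simp [ih]

theorem pv_bits_le (expected : List String) (rest : List String) (ei : Nat)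
    (h : ei ≤ expected.length) : (pvBits expected rest ei).1 ≤ expected.length := by
  induction rest generalizing ei with
  | nil => simpa [pvBits] using h
  | cons l rest ih =>
    by_cases hc : ei < expected.length ∧ l = expected.getD ei ""
    · simp only [pvBits, if_pos hc]; exact ih (ei + 1) hc.1
    · simp only [pvBits, if_neg hc]; exact ih ei h

-- A's loop computes pvBits: matched_expected stays a true-prefix, matched_detected grows in place
theorem pv_aLoop_eq (expected : List String) (rest : List String) (ei : Nat)
    (pre : List Bool) (h : ei ≤ expected.length) :
    pvALoop expected rest pre.length ei
      (List.replicate ei true ++ List.replicate (expected.length - ei) false)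
      (pre ++ List.replicate rest.length false)
    = ((pvBits expected rest ei).1,
       List.replicate (pvBits expected rest ei).1 true ++
         List.replicate (expected.length - (pvBits expected rest ei).1) false,
       pre ++ (pvBits expected rest ei).2) := by
  induction rest generalizing ei pre with
  | nil => simp [pvALoop, pvBits]
  | cons l rest ih =>
    by_cases hc : ei < expected.length ∧ l = expected.getD ei ""
    · have hme : (List.replicate ei true ++ List.replicate (expected.length - ei) false).set ei true
          = List.replicate (ei + 1) true ++ List.replicate (expected.length - (ei + 1)) false := by
        have h1 : expected.length - ei = (expected.length - (ei + 1)) + 1 := by omega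
        have := pv_set_append (List.replicate ei true) false true
          (List.replicate (expected.length - (ei + 1)) false)
        simp only [List.length_replicate] at this
        rw [h1, List.replicate_succ]
        rw [this, List.replicate_succ']
        simp
      have hmd : (pre ++ List.replicate (rest.length + 1) false).set pre.length true
          = (pre ++ [true]) ++ List.replicate rest.length false := by
        rw [List.replicate_succ]
        rw [pv_set_append pre false true (List.replicate rest.length false)]
        simp
      simp only [pvALoop, List.length_cons, if_pos hc, hme]
      rw [hmd]
      have hlen : pre.length + 1 = (pre ++ [true]).length := by simp
      rw [hlen, ih (ei + 1) (pre ++ [true]) hc.1]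
      simp only [pvBits, if_pos hc]
      simp
    · have hmd : pre ++ List.replicate (rest.length + 1) false
          = (pre ++ [false]) ++ List.replicate rest.length false := by
        rw [List.replicate_succ]; simp
      simp only [pvALoop, List.length_cons, if_neg hc]
      rw [hmd]
      have hlen : pre.length + 1 = (pre ++ [false]).length := by simp
      rw [hlen, ih ei (pre ++ [false]) h]
      simp only [pvBits, if_neg hc]
      simp

-- pvBits with pointer ei is pvG on the expected suffix
theorem pv_bits_eq_g (expected : List String) (det : List String) : ∀ (ei : Nat),
    ei ≤ expected.length →
    pvBits expected det ei
      = (ei + (pvG (expected.drop ei) det).1, (pvG (expected.drop ei) det).2) := by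
  induction det with
  | nil => intro ei _; cases expected.drop ei <;> simp [pvBits, pvG]
  | cons l rest ih =>
    intro ei hle
    by_cases hlt : ei < expected.length
    · have hdrop : expected.drop ei = expected[ei] :: expected.drop (ei + 1) :=
        List.drop_eq_getElem_cons hlt
      have hgetD : expected.getD ei "" = expected[ei] := by
        simp [List.getD_eq_getElem?_getD, List.getElem?_eq_getElem hlt]
      by_cases heq : l = expected[ei]
      · have hc : ei < expected.length ∧ l = expected.getD ei "" := ⟨hlt, by rw [hgetD]; exact heq⟩
        simp only [pvBits, if_pos hc, ih (ei + 1) hlt, hdrop, pvG, if_pos heq]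
        refine Prod.ext ?_ rfl
        simp
        omega
      · have hc : ¬ (ei < expected.length ∧ l = expected.getD ei "") := by
          rw [hgetD]; exact fun h => heq h.2
        simp only [pvBits, if_neg hc, ih ei hle, hdrop, pvG, if_neg heq]
    · have hei : ei = expected.length := by omega
      have hdrop : expected.drop ei = [] := by simp [hei]
      have hc : ¬ (ei < expected.length ∧ l = expected.getD ei "") := fun h => hlt h.1
      simp only [pvBits, if_neg hc, ih ei hle, hdrop, pvG]

-- the all-false mask filters nothing
theorem pv_g_nil (ys : List String) :
    (pvG [] ys).1 = 0 ∧ pvComp (pvG [] ys).2 ys = ys := by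
  induction ys with
  | nil => simp [pvG, pvComp]
  | cons y ys ih => simp [pvG, pvComp, ih.1, ih.2]

-- when e does not occur in ys, the greedy matcher matches nothing and filters nothing
theorem pv_g_break (e : String) (es : List String) : ∀ (ys : List String),
    pvIdx ys e = none →
    (pvG (e :: es) ys).1 = 0 ∧ pvComp (pvG (e :: es) ys).2 ys = ys := by
  intro ys
  induction ys with
  | nil => intro _; simp [pvG, pvComp]
  | cons y ys ih =>
    intro h
    have hne : ¬ y = e := by
      intro he; simp [pvIdx, he] at h
    have h' : pvIdx ys e = none := by
      simpa [pvIdx, hne] using h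
    simp [pvG, hne, pvComp, (ih h').1, (ih h').2]

-- when the first occurrence of e in ys is at d, the greedy matcher matches it there,
-- filters out ys.take d before it, and continues on ys.drop (d+1)
theorem pv_g_found (e : String) (es : List String) : ∀ (ys : List String) (d : Nat),
    pvIdx ys e = some d →
    (pvG (e :: es) ys).1 = (pvG es (ys.drop (d + 1))).1 + 1 ∧
    pvComp (pvG (e :: es) ys).2 ys
      = ys.take d ++ pvComp (pvG es (ys.drop (d + 1))).2 (ys.drop (d + 1)) := by
  intro ys
  induction ys with
  | nil => intro d h; simp [pvIdx] at h
  | cons y ys ih =>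
    intro d h
    by_cases hy : y = e
    · have hd : d = 0 := by simp [pvIdx, hy] at h; omega
      subst hd; subst hy
      simp [pvG, pvComp]
    · obtain ⟨d', hd', rfl⟩ : ∃ d', pvIdx ys e = some d' ∧ d = d' + 1 := by
        simp only [pvIdx, if_neg hy, Option.map_eq_some_iff] at h
        obtain ⟨a, ha, hda⟩ := h
        exact ⟨a, ha, hda.symm⟩
      have := ih d' hd'
      simp [pvG, hy, pvComp, this.1, this.2]

-- B's loop computes the same count, and its accumulated slices plus the final tail
-- are exactly the unmatched detected labels
theorem pv_bLoop_main (full : List String) : ∀ (exp ys : List String) (start k : Nat)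
    (acc : List String), full.drop start = ys →
    ((pvBLoopB full exp start k acc).2.1 = k + (pvG exp ys).1) ∧
    ((pvBLoopB full exp start k acc).2.2 ++ full.drop (pvBLoopB full exp start k acc).1
      = acc ++ pvComp (pvG exp ys).2 ys) := by
  intro exp
  induction exp with
  | nil =>
    intro ys start k acc hdrop
    simp [pvBLoopB, (pv_g_nil ys).1, (pv_g_nil ys).2, hdrop]
  | cons label rest ih =>
    intro ys start k acc hdrop
    cases hidx : pvIdx ys label with
    | none =>
      have hb := pv_g_break label rest ys hidx
      simp [pvBLoopB, hdrop, hidx, hb.1, hb.2]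
    | some d =>
      have hslice : PySem.List.slice full (some (start : Int)) (some ((start + d : Nat) : Int))
          = ys.take d := by
        rw [PySem.List.slice_natCast, hdrop]
        congr 1
        omega
      have hdrop' : full.drop (start + d + 1) = ys.drop (d + 1) := by
        rw [← hdrop, List.drop_drop]
        congr 1
      have hf := pv_g_found label rest ys d hidx
      have hih := ih (ys.drop (d + 1)) (start + d + 1) (k + 1) (acc ++ ys.take d) hdrop'
      constructor
      · simp only [pvBLoopB, hdrop, hidx, hslice]
        rw [hih.1, hf.1]
        omega
      · simp only [pvBLoopB, hdrop, hidx, hslice]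
        rw [hih.2, hf.2, List.append_assoc]

-- filtering expected by a true-prefix mask drops exactly that prefix
theorem pv_comp_drop (expected : List String) (a : Nat) (h : a ≤ expected.length) :
    pvComp (List.replicate a true ++ List.replicate (expected.length - a) false) expected
      = expected.drop a := by
  induction expected generalizing a with
  | nil => simp [pvComp]
  | cons l ls ih =>
    cases a with
    | zero =>
      simp only [List.replicate, List.nil_append, List.length_cons, Nat.sub_zero,
        List.replicate_succ, pvComp, if_neg (by simp : ¬ false = true), List.drop_zero]
      have h2 := ih 0 (Nat.zero_le _)
      simpa using h2
    | succ a =>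
      simp only [List.replicate_succ, List.cons_append, pvComp, List.drop_succ_cons]
      have : ls.length + 1 - (a + 1) = ls.length - a := by omega
      simp only [List.length_cons, this]
      exact ih a (by simpa using h)

-- ===== VERDICT (by name: the statement is the Claim_ definition above) =====
theorem sequence_diff_spec : Claim_equal_sequence_diff := by
  intro expected detected _
  show sequence_diff expected detected = sequence_diff_alt expected detected
  unfold sequence_diff sequence_diff_alt
  have hA := pv_aLoop_eq expected detected 0 [] (Nat.zero_le _)
  simp only [List.length_nil, List.replicate, List.nil_append, Nat.sub_zero] at hA
  rw [hA]
  have hg := pv_bits_eq_g expected detected 0 (Nat.zero_le _)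
  simp only [List.drop_zero, Nat.zero_add] at hg
  have hle : (pvG expected detected).1 ≤ expected.length := by
    have := pv_bits_le expected detected 0 (Nat.zero_le _)
    rw [hg] at this
    simpa using this
  have hB := pv_bLoop_main detected expected detected 0 0 [] (by simp)
  simp only [PySem.List.slice_from_natCast]
  refine Prod.ext ?_ ?_
  · simp only [hg]
    rw [pv_comp_drop expected _ hle, hB.1]
    simp
  · simp only [hg]
    rw [hB.2]
    simp
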